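-- pv_equiv track=rewrite | github.com/robotocore/robotocore | src/robotocore/services/stepfunctions/jsonata.py | _find_ternary
-- ===== SOURCE A (Python) =====
-- def _find_ternary(expr: str) -> tuple[str, str, str] | None:
--     """Find top-level ternary operator ? : in expression."""
--     depth = 0
--     q_pos = -1
--     in_quote = False
--     quote_char = None
--
--     for i, ch in enumerate(expr):
--         if ch in ('"', "'") and not in_quote:
--             in_quote = True
--             quote_char = ch
--         elif ch == quote_char and in_quote:
--             in_quote = False
--         elif in_quote:
--             continue
--         elif ch in "([{":
--             depth += 1
--         elif ch in ")]}":
--             depth -= 1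
--         elif ch == "?" and depth == 0 and q_pos == -1:
--             q_pos = i
--         elif ch == ":" and depth == 0 and q_pos >= 0:
--             return (expr[:q_pos], expr[q_pos + 1 : i], expr[i + 1 :])
--
--     return None
-- ===== SOURCE B (Python) =====
-- def _find_top_level(s, target, start):
--     """Index of the first top-level (outside quotes/brackets) `target` char at or after `start`, else None."""
--     depth = 0
--     in_quote = False
--     quote_char = None
--     for i in range(start, len(s)):
--         ch = s[i]
--         if ch in ('"', "'") and not in_quote:
--             in_quote = True
--             quote_char = ch
--         elif in_quote:
--             if ch == quote_char:
--                 in_quote = False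
--         elif ch in "([{":
--             depth += 1
--         elif ch in ")]}":
--             depth -= 1
--         elif ch == target and depth == 0:
--             return i
--     return None
--
--
-- def _find_ternary(expr: str) -> tuple[str, str, str] | None:
--     """Find top-level ternary operator ? : in expression."""
--     q = _find_top_level(expr, "?", 0)
--     if q is None:
--         return None
--     c = _find_top_level(expr, ":", q + 1)
--     if c is None:
--         return None
--     return (expr[:q], expr[q + 1 : c], expr[c + 1 :])
-- ===== Notes on version B (the rewrite author's own statement) =====
-- stated objective: simpler
-- what changed: A's single stateful scan (depth, q_pos, quote state, early return) is decomposed into two independent calls of one reusable helper that finds the first top-level index of a given character: find the question mark, then the colon after it, then slice.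
import Mathlib
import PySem

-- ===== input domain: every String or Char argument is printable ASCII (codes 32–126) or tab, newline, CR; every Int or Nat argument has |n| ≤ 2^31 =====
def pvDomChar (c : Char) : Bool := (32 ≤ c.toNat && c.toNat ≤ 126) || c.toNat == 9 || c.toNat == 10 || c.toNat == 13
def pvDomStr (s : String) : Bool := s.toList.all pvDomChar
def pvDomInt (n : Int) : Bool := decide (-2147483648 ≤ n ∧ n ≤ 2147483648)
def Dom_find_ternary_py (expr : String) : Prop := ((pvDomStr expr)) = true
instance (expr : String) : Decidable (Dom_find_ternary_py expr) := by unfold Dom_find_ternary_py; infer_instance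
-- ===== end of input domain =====

-- B replaces A's single stateful scan by two independent top-level-index searches
-- (find first top-level '?', then first top-level ':' after it) via one shared helper;
-- objective: simpler decomposition, same cost.

-- ===== PORT A =====
-- A's single for-loop over enumerate(expr), state (depth, q_pos, in_quote, quote_char),
-- early return on the top-level ':' after a top-level '?'.
def pvALoop (expr : List Char) (cs : List Char) (i : Nat) (depth : Int) (q_pos : Int)
    (in_quote : Bool) (quote_char : Option Char) : Option (String × String × String) :=
  match cs with
  | [] => none
  | ch :: rest =>
    if (ch = '"' ∨ ch = '\'') ∧ ¬ in_quote then
      pvALoop expr rest (i+1) depth q_pos true (some ch)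
    else if some ch = quote_char ∧ in_quote then
      pvALoop expr rest (i+1) depth q_pos false quote_char
    else if in_quote then
      pvALoop expr rest (i+1) depth q_pos in_quote quote_char
    else if ch = '(' ∨ ch = '[' ∨ ch = '{' then
      pvALoop expr rest (i+1) (depth+1) q_pos in_quote quote_char
    else if ch = ')' ∨ ch = ']' ∨ ch = '}' then
      pvALoop expr rest (i+1) (depth-1) q_pos in_quote quote_char
    else if ch = '?' ∧ depth = 0 ∧ q_pos = -1 then
      pvALoop expr rest (i+1) depth (i : Int) in_quote quote_char
    else if ch = ':' ∧ depth = 0 ∧ q_pos ≥ 0 then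
      some (String.mk (PySem.List.slice expr none (some q_pos)),
            String.mk (PySem.List.slice expr (some (q_pos+1)) (some (i : Int))),
            String.mk (PySem.List.slice expr (some ((i : Int)+1)) none))
    else
      pvALoop expr rest (i+1) depth q_pos in_quote quote_char

def find_ternary_py (expr : String) : Option (String × String × String) :=
  pvALoop expr.toList expr.toList 0 0 (-1) false none

-- ===== PORT B =====
-- Source B's helper _find_top_level: scan from index `start` (here: over the suffix `cs`,
-- carrying the absolute index i), return the first top-level index of `target`.
def pvBFind (cs : List Char) (i : Nat) (target : Char) (depth : Int)
    (in_quote : Bool) (quote_char : Option Char) : Option Nat :=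
  match cs with
  | [] => none
  | ch :: rest =>
    if (ch = '"' ∨ ch = '\'') ∧ ¬ in_quote then
      pvBFind rest (i+1) target depth true (some ch)
    else if in_quote then
      if some ch = quote_char then pvBFind rest (i+1) target depth false quote_char
      else pvBFind rest (i+1) target depth in_quote quote_char
    else if ch = '(' ∨ ch = '[' ∨ ch = '{' then
      pvBFind rest (i+1) target (depth+1) in_quote quote_char
    else if ch = ')' ∨ ch = ']' ∨ ch = '}' then
      pvBFind rest (i+1) target (depth-1) in_quote quote_char
    else if ch = target ∧ depth = 0 then
      some i
    else
      pvBFind rest (i+1) target depth in_quote quote_char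

def find_ternary_py_alt (expr : String) : Option (String × String × String) :=
  match pvBFind expr.toList 0 '?' 0 false none with
  | none => none
  | some q =>
    match pvBFind (expr.toList.drop (q+1)) (q+1) ':' 0 false none with
    | none => none
    | some c =>
      some (String.mk (PySem.List.slice expr.toList none (some (q : Int))),
            String.mk (PySem.List.slice expr.toList (some ((q : Int)+1)) (some (c : Int))),
            String.mk (PySem.List.slice expr.toList (some ((c : Int)+1)) none))

-- ===== PRECONDITION & SPEC =====
def Spec_find_ternary_py (expr : String) (out : Option (String × String × String)) : Prop := out = find_ternary_py_alt expr
instance (expr : String) (out : Option (String × String × String)) : Decidable (Spec_find_ternary_py expr out) := by unfold Spec_find_ternary_py; infer_instance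

-- ===== CLAIM (what is proved, stated in full; the proofs are below) =====
def Claim_equal_find_ternary_py : Prop := ∀ (expr : String), Dom_find_ternary_py expr → Spec_find_ternary_py expr (find_ternary_py expr)

-- ===== LEMMAS AND PROOFS =====

-- continuation of A's loop after the '?' is found at absolute index q (cs is the suffix starting at i)
def pvAfterQ (expr cs : List Char) (i : Nat) (o : Option Nat) : Option (String × String × String) :=
  match o with
  | none => none
  | some q => pvALoop expr (cs.drop (q+1-i)) (q+1) 0 (q : Int) false none

-- the final triple built from q and the found ':' index
def pvOut (expr : List Char) (q : Nat) (o : Option Nat) : Option (String × String × String) :=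
  match o with
  | none => none
  | some c =>
    some (String.mk (PySem.List.slice expr none (some (q : Int))),
          String.mk (PySem.List.slice expr (some ((q : Int)+1)) (some (c : Int))),
          String.mk (PySem.List.slice expr (some ((c : Int)+1)) none))

-- When not inside a quote, A's loop never reads quote_char before overwriting it.
theorem pvALoop_qc_irrel (expr : List Char) (cs : List Char) (i : Nat) (depth : Int)
    (q_pos : Int) (qc qc' : Option Char) :
    pvALoop expr cs i depth q_pos false qc = pvALoop expr cs i depth q_pos false qc' := by
  induction cs generalizing i depth q_pos qc qc' with
  | nil => rfl
  | cons ch rest ih =>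
    simp only [pvALoop, Bool.false_eq_true, and_false, if_false]
    split_ifs <;> first | apply ih | rfl

-- pvBFind returns an index ≥ its start index.
theorem pvBFind_ge (cs : List Char) (i : Nat) (t : Char) (d : Int) (inq : Bool)
    (qc : Option Char) (q : Nat) (h : pvBFind cs i t d inq qc = some q) : i ≤ q := by
  induction cs generalizing i d inq qc with
  | nil => simp [pvBFind] at h
  | cons ch rest ih =>
    simp only [pvBFind] at h
    split_ifs at h with h1 h2 h3 h4 h5 h6
    · exact Nat.le_of_succ_le (ih _ _ _ _ h)
    · exact Nat.le_of_succ_le (ih _ _ _ _ h)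
    · exact Nat.le_of_succ_le (ih _ _ _ _ h)
    · exact Nat.le_of_succ_le (ih _ _ _ _ h)
    · exact Nat.le_of_succ_le (ih _ _ _ _ h)
    · exact le_of_eq (Option.some.inj h)
    · exact Nat.le_of_succ_le (ih _ _ _ _ h)

-- pvAfterQ does not care whether the head of the suffix is still present,
-- provided the found index lies beyond it.
theorem pvAfterQ_shift (expr : List Char) (ch : Char) (rest : List Char) (i : Nat)
    (o : Option Nat) (h : ∀ q, o = some q → i + 1 ≤ q) :
    pvAfterQ expr rest (i+1) o = pvAfterQ expr (ch :: rest) i o := by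
  cases o with
  | none => rfl
  | some q =>
    have hq := h q rfl
    simp only [pvAfterQ]
    have hd : q+1-i = (q+1-(i+1)) + 1 := by omega
    rw [hd, List.drop_succ_cons]

-- Phase 1: while q_pos = -1, A's loop is B's search for '?' followed by a restart of
-- A's loop just past the found '?' with depth 0, q_pos set and quote state clear.
theorem pvPhase1 (expr : List Char) (cs : List Char) (i : Nat) (d : Int) (inq : Bool)
    (qc : Option Char) :
    pvALoop expr cs i d (-1) inq qc = pvAfterQ expr cs i (pvBFind cs i '?' d inq qc) := by
  induction cs generalizing i d inq qc with
  | nil => rfl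
  | cons ch rest ih =>
    simp only [pvALoop, pvBFind]
    by_cases h1 : (ch = '"' ∨ ch = '\'') ∧ ¬ inq = true
    · conv_lhs => rw [if_pos h1]
      conv_rhs => rw [if_pos h1]
      rw [ih]
      exact pvAfterQ_shift _ _ _ _ _ (fun q hq => pvBFind_ge _ _ _ _ _ _ _ hq)
    · conv_lhs => rw [if_neg h1]
      conv_rhs => rw [if_neg h1]
      by_cases h3 : inq = true
      · by_cases hqc : some ch = qc
        · conv_lhs => rw [if_pos ⟨hqc, h3⟩]
          conv_rhs => rw [if_pos h3, if_pos hqc]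
          rw [ih]
          exact pvAfterQ_shift _ _ _ _ _ (fun q hq => pvBFind_ge _ _ _ _ _ _ _ hq)
        · conv_lhs => rw [if_neg (fun hc => hqc hc.1), if_pos h3]
          conv_rhs => rw [if_pos h3, if_neg hqc]
          rw [ih]
          exact pvAfterQ_shift _ _ _ _ _ (fun q hq => pvBFind_ge _ _ _ _ _ _ _ hq)
      · conv_lhs => rw [if_neg (fun hc => h3 hc.2), if_neg h3]
        conv_rhs => rw [if_neg h3]
        by_cases h4 : ch = '(' ∨ ch = '[' ∨ ch = '{'
        · conv_lhs => rw [if_pos h4]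
          conv_rhs => rw [if_pos h4]
          rw [ih]
          exact pvAfterQ_shift _ _ _ _ _ (fun q hq => pvBFind_ge _ _ _ _ _ _ _ hq)
        · conv_lhs => rw [if_neg h4]
          conv_rhs => rw [if_neg h4]
          by_cases h5 : ch = ')' ∨ ch = ']' ∨ ch = '}'
          · conv_lhs => rw [if_pos h5]
            conv_rhs => rw [if_pos h5]
            rw [ih]
            exact pvAfterQ_shift _ _ _ _ _ (fun q hq => pvBFind_ge _ _ _ _ _ _ _ hq)
          · conv_lhs => rw [if_neg h5]
            conv_rhs => rw [if_neg h5]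
            by_cases h6 : ch = '?' ∧ d = 0
            · conv_lhs => rw [if_pos (show ch = '?' ∧ d = 0 ∧ True from ⟨h6.1, h6.2, trivial⟩)]
              conv_rhs => rw [if_pos h6]
              have hinq : inq = false := by cases inq <;> simp_all
              have hdrop : i+1-i = 1 := by omega
              simp only [pvAfterQ, hdrop, List.drop_succ_cons, List.drop_zero, h6.2, hinq]
              exact pvALoop_qc_irrel _ _ _ _ _ qc none
            · conv_lhs =>
                rw [if_neg (show ¬(ch = '?' ∧ d = 0 ∧ True) from fun hc => h6 ⟨hc.1, hc.2.1⟩),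
                    if_neg (show ¬(ch = ':' ∧ d = 0 ∧ (-1:Int) ≥ 0) from fun hc => by
                      have h := hc.2.2; omega)]
              conv_rhs => rw [if_neg h6]
              rw [ih]
              exact pvAfterQ_shift _ _ _ _ _ (fun q hq => pvBFind_ge _ _ _ _ _ _ _ hq)

-- Phase 2: once q_pos = q ≥ 0, A's loop is B's search for ':' producing the slice triple.
theorem pvPhase2 (expr : List Char) (cs : List Char) (i : Nat) (d : Int) (q : Nat)
    (inq : Bool) (qc : Option Char) :
    pvALoop expr cs i d (q : Int) inq qc = pvOut expr q (pvBFind cs i ':' d inq qc) := by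
  induction cs generalizing i d inq qc with
  | nil => rfl
  | cons ch rest ih =>
    simp only [pvALoop, pvBFind]
    by_cases h1 : (ch = '"' ∨ ch = '\'') ∧ ¬ inq = true
    · conv_lhs => rw [if_pos h1]
      conv_rhs => rw [if_pos h1]
      exact ih _ _ _ _
    · conv_lhs => rw [if_neg h1]
      conv_rhs => rw [if_neg h1]
      by_cases h3 : inq = true
      · by_cases hqc : some ch = qc
        · conv_lhs => rw [if_pos ⟨hqc, h3⟩]
          conv_rhs => rw [if_pos h3, if_pos hqc]
          exact ih _ _ _ _
        · conv_lhs => rw [if_neg (fun hc => hqc hc.1), if_pos h3]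
          conv_rhs => rw [if_pos h3, if_neg hqc]
          exact ih _ _ _ _
      · conv_lhs => rw [if_neg (fun hc => h3 hc.2), if_neg h3]
        conv_rhs => rw [if_neg h3]
        by_cases h4 : ch = '(' ∨ ch = '[' ∨ ch = '{'
        · conv_lhs => rw [if_pos h4]
          conv_rhs => rw [if_pos h4]
          exact ih _ _ _ _
        · conv_lhs => rw [if_neg h4]
          conv_rhs => rw [if_neg h4]
          by_cases h5 : ch = ')' ∨ ch = ']' ∨ ch = '}'
          · conv_lhs => rw [if_pos h5]
            conv_rhs => rw [if_pos h5]
            exact ih _ _ _ _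
          · conv_lhs => rw [if_neg h5]
            conv_rhs => rw [if_neg h5]
            conv_lhs =>
              rw [if_neg (show ¬(ch = '?' ∧ d = 0 ∧ (q:Int) = -1) from fun hc => by
                    have h := hc.2.2; omega)]
            by_cases h7 : ch = ':' ∧ d = 0
            · conv_lhs =>
                rw [if_pos (show ch = ':' ∧ d = 0 ∧ (q:Int) ≥ 0 from ⟨h7.1, h7.2, by positivity⟩)]
              conv_rhs => rw [if_pos h7]
              rfl
            · conv_lhs =>
                rw [if_neg (show ¬(ch = ':' ∧ d = 0 ∧ (q:Int) ≥ 0) from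
                      fun hc => h7 ⟨hc.1, hc.2.1⟩)]
              conv_rhs => rw [if_neg h7]
              exact ih _ _ _ _

-- ===== VERDICT (by name: the statement is the Claim_ definition above) =====
theorem find_ternary_py_spec : Claim_equal_find_ternary_py := by
  intro expr _
  unfold Spec_find_ternary_py find_ternary_py find_ternary_py_alt
  rw [pvPhase1]
  cases hb : pvBFind expr.toList 0 '?' 0 false none with
  | none => rfl
  | some q =>
    simp only [pvAfterQ, Nat.sub_zero]
    rw [pvPhase2]
    cases hc : pvBFind (expr.toList.drop (q+1)) (q+1) ':' 0 false none with
    | none => rfl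
    | some c => rfl
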